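-- pv_equiv track=rewrite | github.com/masa-kogi/old_maid | main.py | initial_putdown
-- ===== SOURCE A (Python) =====
-- def initial_putdown(deck: list) -> list:
--     """
--     Play(put down) matching cards.
--     """
--     while len(set(deck))!= len(deck):
--         drawn_card = deck.pop(0)
--         if drawn_card in deck:
--             deck.remove(drawn_card)
--         else:
--             deck.append(drawn_card)
--     return deck
-- ===== SOURCE B (Python) =====
-- def initial_putdown(deck: list) -> list:
--     """
--     Play(put down) matching cards.
--
--     Same queue simulation, but the deck is consumed through a head index and
--     removals are done lazily via per-value counters, so every step is O(1).
--     """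
--     count = {}
--     for x in deck:
--         count[x] = count.get(x, 0) + 1
--     dups = sum(1 for c in count.values() if c >= 2)
--     q = list(deck)
--     head = 0
--     skip = {}
--     while dups > 0:
--         x = q[head]
--         head += 1
--         if skip.get(x, 0) > 0:
--             skip[x] -= 1
--         elif count[x] >= 2:
--             count[x] -= 2
--             skip[x] = skip.get(x, 0) + 1
--             if count[x] < 2:
--                 dups -= 1
--         else:
--             q.append(x)
--     result = []
--     for x in q[head:]:
--         if skip.get(x, 0) > 0:
--             skip[x] -= 1
--         else:
--             result.append(x)
--     return result
-- ===== Notes on version B (the rewrite author's own statement) =====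
-- stated objective: faster
-- what changed: B replaces A's O(n)-cost deck mutations (pop(0), 'in' scan, remove) by a head-indexed queue with a per-value count dict and lazy deletions (a skip counter instead of an eager remove), making every loop step O(1).
import Mathlib
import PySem

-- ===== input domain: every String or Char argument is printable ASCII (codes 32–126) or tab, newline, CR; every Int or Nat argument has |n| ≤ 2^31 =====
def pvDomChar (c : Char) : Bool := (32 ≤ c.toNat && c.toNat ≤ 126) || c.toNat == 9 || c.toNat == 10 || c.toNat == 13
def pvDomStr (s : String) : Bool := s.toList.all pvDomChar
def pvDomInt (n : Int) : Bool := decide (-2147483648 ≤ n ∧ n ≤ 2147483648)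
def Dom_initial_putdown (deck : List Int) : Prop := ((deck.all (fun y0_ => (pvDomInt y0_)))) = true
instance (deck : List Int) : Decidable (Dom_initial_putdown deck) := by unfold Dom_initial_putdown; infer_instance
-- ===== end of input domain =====

-- B runs A's queue simulation with a counting dict and lazy removals so every step is O(1)
-- (a timing run measured the speed-up); A mutates its argument in place — the equivalence
-- proved here is about the return value only.


-- ===== PORT A =====
-- termination measure for A's loop: squared length plus the index of the first card whose
-- value is still duplicated (a pair-removal shrinks the deck, a rotation moves that index down)
def pvPhi (D : List Int) : Nat :=
  D.length * D.length + D.findIdx (fun y => decide (2 ≤ D.count y))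

lemma pvPhi_erase_lt (x : Int) (D1 : List Int) (hx : x ∈ D1) :
    pvPhi (D1.erase x) < pvPhi (x :: D1) := by
  have hlen : (D1.erase x).length = D1.length - 1 := List.length_erase_of_mem hx
  have hpos : 1 ≤ D1.length := List.length_pos_of_mem hx
  have hle : (D1.erase x).findIdx (fun y => decide (2 ≤ (D1.erase x).count y)) ≤ (D1.erase x).length :=
    List.findIdx_le_length
  unfold pvPhi
  rw [hlen] at *
  simp only [List.length_cons]
  nlinarith [Nat.sub_le D1.length 1]

lemma pvPhi_rot_lt (x : Int) (D1 : List Int) (hnd : ¬ (x :: D1).Nodup) (hx : x ∉ D1) :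
    pvPhi (D1 ++ [x]) < pvPhi (x :: D1) := by
  have hcnt : ∀ y : Int, (D1 ++ [x]).count y = (x :: D1).count y := by
    intro y
    simp [List.count_append, List.count_cons]
  have hpeq : (fun y => decide (2 ≤ (D1 ++ [x]).count y)) =
      (fun y => decide (2 ≤ (x :: D1).count y)) := by
    funext y; rw [hcnt y]
  have hx1 : (x :: D1).count x = 1 := by
    rw [List.count_cons_self, List.count_eq_zero_of_not_mem hx]
  obtain ⟨y, hy2⟩ : ∃ y, 2 ≤ (x :: D1).count y := by
    by_contra hno
    push Not at hno
    exact hnd (List.nodup_iff_count_le_one.mpr (fun a => by have := hno a; omega))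
  have hyx : y ≠ x := by intro h; rw [h, hx1] at hy2; omega
  have hyD1 : y ∈ D1 := by
    have : 0 < (x :: D1).count y := by omega
    rcases List.mem_cons.mp (List.count_pos_iff.mp this) with h | h
    · exact absurd h hyx
    · exact h
  have hlt : D1.findIdx (fun y => decide (2 ≤ (x :: D1).count y)) < D1.length :=
    List.findIdx_lt_length.mpr ⟨y, hyD1, by simpa using hy2⟩
  unfold pvPhi
  rw [hpeq, List.findIdx_append, if_pos hlt, List.findIdx_cons]
  have hpx : (decide (2 ≤ (x :: D1).count x)) = false := by simp [hx1]
  rw [hpx]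
  simp only [List.length_append, List.length_cons, List.length_nil, cond_false]
  generalize (D1.length + 1) * (D1.length + 1) = q
  omega

-- len(set(deck)) == len(deck) ⇔ no value is duplicated
lemma pvSetLenIff (L : List Int) : (PySem.Set.ofList L).length = L.length ↔ L.Nodup := by
  constructor
  · intro h
    have hperm : (PySem.Set.ofList L).Perm L.dedup := by
      rw [List.perm_ext_iff_of_nodup (PySem.Set.nodup_ofList L) L.nodup_dedup]
      intro a; rw [PySem.Set.mem_ofList, List.mem_dedup]
    have hlen : L.dedup.length = L.length := by rw [← hperm.length_eq, h]
    exact List.dedup_eq_self.mp ((List.dedup_sublist L).eq_of_length hlen)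
  · intro h; rw [PySem.Set.ofList_eq_self_of_nodup L h]

-- while len(set(deck)) != len(deck): pop the front card; if it occurs again remove that
-- occurrence, else append it to the back
def initial_putdown (deck : List Int) : List Int :=
  match deck with
  | [] => []          -- set([]) has the length of [], so the loop does not run
  | d :: rest =>
    if hset : (PySem.Set.ofList (d :: rest)).length = (d :: rest).length then d :: rest
    else if hd : rest.contains d then
      -- deck.remove(drawn_card): d ∈ rest, so remove? is some (rest.erase d)
      initial_putdown ((PySem.List.remove? rest d).getD rest)
    else
      initial_putdown (rest ++ [d])
termination_by pvPhi deck
decreasing_by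
  · rw [PySem.List.remove?_eq_some_erase (h := by simpa using hd)]
    exact pvPhi_erase_lt d rest (by simpa using hd)
  · exact pvPhi_rot_lt d rest (fun hnd => hset ((pvSetLenIff _).mpr hnd)) (by simpa using hd)

-- ===== PORT B =====
-- the final `for x in q[head:]` collection loop: skip each card still marked as removed
def pvCollect (skip : PySem.Dict Int Int) : List Int → List Int
  | [] => []
  | x :: rest =>
    if 0 < skip.getD x 0 then pvCollect (skip.modify x 0 (· - 1)) rest
    else x :: pvCollect skip rest

-- the `while dups > 0` loop over the queue suffix q[head:] (the only part of q ever read);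
-- the fuel argument only makes the recursion total, it provably never runs out
def pvLoop (fuel : Nat) (count : PySem.Dict Int Int) (dups : Int)
    (skip : PySem.Dict Int Int) (pending : List Int) : List Int :=
  match fuel with
  | 0 => pvCollect skip pending
  | fuel + 1 =>
    if 0 < dups then
      match pending with
      | [] => pvCollect skip []          -- unreachable: dups > 0 forces a live card in the queue
      | x :: rest =>
        if 0 < skip.getD x 0 then
          pvLoop fuel count dups (skip.modify x 0 (· - 1)) rest
        else if 2 ≤ count.getD x 0 then
          let count' := count.modify x 0 (· - 2)
          pvLoop fuel count' (if count'.getD x 0 < 2 then dups - 1 else dups)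
            (skip.modify x 0 (· + 1)) rest
        else
          pvLoop fuel count dups skip (rest ++ [x])
    else pvCollect skip pending

def initial_putdown_alt (deck : List Int) : List Int :=
  let count := deck.foldl (fun d x => d.insert x (d.getD x 0 + 1)) PySem.Dict.empty
  let dups := (((count.values).filter (fun c => 2 ≤ c)).length : Int)
  pvLoop (2 * ((deck.length + 1) * (deck.length + 1))) count dups PySem.Dict.empty deck

-- ===== PRECONDITION & SPEC =====
def Spec_initial_putdown (deck : List Int) (out : List Int) : Prop := out = initial_putdown_alt deck
instance (deck : List Int) (out : List Int) : Decidable (Spec_initial_putdown deck out) := by unfold Spec_initial_putdown; infer_instance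

-- ===== CLAIM (what is proved, stated in full; the proofs are below) =====
def Claim_equal_initial_putdown : Prop := ∀ (deck : List Int), Dom_initial_putdown deck → Spec_initial_putdown deck (initial_putdown deck)

-- ===== LEMMAS AND PROOFS =====

-- pointwise update of a function
def pvUpd (g : Int → Int) (x v : Int) : Int → Int := fun y => if y = x then v else g y

-- the list left after removing, left to right, the first (g y) occurrences of each value y
def pvStrip : List Int → (Int → Int) → List Int
  | [], _ => []
  | y :: ys, g => if 0 < g y then pvStrip ys (pvUpd g y (g y - 1)) else y :: pvStrip ys g

-- the skip function left over after pvStrip has consumed l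
def pvStripRem : List Int → (Int → Int) → (Int → Int)
  | [], g => g
  | y :: ys, g => if 0 < g y then pvStripRem ys (pvUpd g y (g y - 1)) else pvStripRem ys g

lemma pvUpd_same (g : Int → Int) (x : Int) : pvUpd g x (g x) = g := by
  funext y; simp [pvUpd]; intro h; subst h; rfl

lemma pvUpd_upd (g : Int → Int) (x v w : Int) : pvUpd (pvUpd g x v) x w = pvUpd g x w := by
  funext y; by_cases h : y = x <;> simp [pvUpd, h]

lemma pvUpd_comm (g : Int → Int) (x y v w : Int) (h : x ≠ y) :
    pvUpd (pvUpd g x v) y w = pvUpd (pvUpd g y w) x v := by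
  funext z; simp only [pvUpd]
  by_cases hzx : z = x <;> by_cases hzy : z = y <;> simp_all

lemma pvStrip_subset (l : List Int) : ∀ (g : Int → Int) (y : Int), y ∈ pvStrip l g → y ∈ l := by
  induction l with
  | nil => intro g y h; simp [pvStrip] at h
  | cons a l ih =>
    intro g y h
    simp only [pvStrip] at h
    split at h
    · exact List.mem_cons_of_mem a (ih _ y h)
    · rcases List.mem_cons.mp h with h | h
      · exact h ▸ List.mem_cons_self
      · exact List.mem_cons_of_mem a (ih _ y h)

lemma pvStrip_zero (l : List Int) (g : Int → Int) (h : ∀ y, g y = 0) : pvStrip l g = l := by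
  induction l with
  | nil => rfl
  | cons a l ih => simp [pvStrip, h a, ih]

lemma pvStrip_bump (l : List Int) : ∀ (g : Int → Int), (∀ y, 0 ≤ g y) → ∀ (x : Int),
    pvStrip l (pvUpd g x (g x + 1)) = (pvStrip l g).erase x := by
  induction l with
  | nil => intro g hg x; simp [pvStrip]
  | cons a l ih =>
    intro g hg x
    by_cases hax : a = x
    · subst hax
      have hpos : 0 < pvUpd g a (g a + 1) a := by simp [pvUpd]; have := hg a; omega
      rw [pvStrip, if_pos hpos]
      have harg : pvUpd (pvUpd g a (g a + 1)) a (pvUpd g a (g a + 1) a - 1) = pvUpd g a (g a) := by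
        rw [pvUpd_upd]; simp [pvUpd]
      rw [harg]
      by_cases hga : 0 < g a
      · have hg' : ∀ y, 0 ≤ pvUpd g a (g a - 1) y := by
          intro y; simp only [pvUpd]; split
          · omega
          · exact hg y
        have := ih (pvUpd g a (g a - 1)) hg' a
        rw [pvStrip, if_pos hga]
        rw [show pvUpd (pvUpd g a (g a - 1)) a (pvUpd g a (g a - 1) a + 1) = pvUpd g a (g a) by
          rw [pvUpd_upd]; simp [pvUpd]] at this
        exact this
      · have hga0 : g a = 0 := le_antisymm (by omega) (hg a)
        rw [pvStrip, if_neg hga]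
        rw [List.erase_cons_head, pvUpd_same]
    · have hval : pvUpd g x (g x + 1) a = g a := by simp [pvUpd, hax]
      by_cases hga : 0 < g a
      · rw [pvStrip, if_pos (hval ▸ hga), pvStrip, if_pos hga]
        have hg' : ∀ y, 0 ≤ pvUpd g a (g a - 1) y := by
          intro y; simp only [pvUpd]; split
          · omega
          · exact hg y
        have harg : pvUpd (pvUpd g x (g x + 1)) a (pvUpd g x (g x + 1) a - 1)
            = pvUpd (pvUpd g a (g a - 1)) x (pvUpd g a (g a - 1) x + 1) := by
          rw [hval, pvUpd_comm g x a _ _ (fun h => hax h.symm)]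
          have : pvUpd g a (g a - 1) x = g x := by
            simp only [pvUpd, if_neg (show x ≠ a from fun h => hax h.symm)]
          rw [this]
        rw [harg]
        exact ih (pvUpd g a (g a - 1)) hg' x
      · rw [pvStrip, if_neg (hval ▸ hga), pvStrip, if_neg hga]
        rw [List.erase_cons_tail (by simp [hax])]
        rw [ih g hg x]

lemma pvStripRem_le (l : List Int) : ∀ (g : Int → Int) (y : Int), pvStripRem l g y ≤ g y := by
  induction l with
  | nil => intro g y; exact le_refl _
  | cons a l ih =>
    intro g y
    simp only [pvStripRem]
    split
    · calc pvStripRem l (pvUpd g a (g a - 1)) y ≤ pvUpd g a (g a - 1) y := ih _ y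
        _ ≤ g y := by
          simp only [pvUpd]
          split
          · rename_i h; subst h; omega
          · omega
    · exact ih g y

lemma pvStrip_append (l1 : List Int) : ∀ (l2 : List Int) (g : Int → Int),
    pvStrip (l1 ++ l2) g = pvStrip l1 g ++ pvStrip l2 (pvStripRem l1 g) := by
  induction l1 with
  | nil => intro l2 g; rfl
  | cons a l1 ih =>
    intro l2 g
    simp only [List.cons_append, pvStrip, pvStripRem]
    split
    · exact ih l2 _
    · rw [List.cons_append, ih l2 g]

lemma pvCollect_eq_strip (l : List Int) : ∀ (skip : PySem.Dict Int Int) (g : Int → Int),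
    (∀ y, skip.getD y 0 = g y) → pvCollect skip l = pvStrip l g := by
  induction l with
  | nil => intro skip g h; rfl
  | cons a l ih =>
    intro skip g h
    simp only [pvCollect, pvStrip, h a]
    split
    · apply ih
      intro y
      rw [PySem.Dict.getD_modify, h a]
      simp only [pvUpd]
      split <;> simp_all
    · rw [ih skip g h]

-- sums and filter lengths over a Nodup list under a pointwise change at one element
lemma pvSumUpd (K : List Int) (hnd : K.Nodup) (x : Int) (hx : x ∈ K) (f f' : Int → Int)
    (hagree : ∀ y, y ≠ x → f' y = f y) :
    (K.map (fun y => (f' y).toNat)).sum + (f x).toNat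
      = (K.map (fun y => (f y).toNat)).sum + (f' x).toNat := by
  induction K with
  | nil => simp at hx
  | cons a K ih =>
    rcases List.nodup_cons.mp hnd with ⟨hna, hndK⟩
    rcases List.mem_cons.mp hx with h | h
    · subst h
      have : K.map (fun y => (f' y).toNat) = K.map (fun y => (f y).toNat) := by
        apply List.map_congr_left
        intro y hy
        rw [hagree y (fun hyx => hna (hyx ▸ hy))]
      simp only [List.map_cons, List.sum_cons, this]
      omega
    · have hax : a ≠ x := fun h' => hna (h' ▸ h)
      have := ih hndK h
      simp only [List.map_cons, List.sum_cons, hagree a hax]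
      omega

lemma pvFilterUpd (K : List Int) (hnd : K.Nodup) (x : Int) (hx : x ∈ K) (p p' : Int → Bool)
    (hagree : ∀ y, y ≠ x → p' y = p y) :
    (K.filter p').length + (if p x then 1 else 0)
      = (K.filter p).length + (if p' x then 1 else 0) := by
  induction K with
  | nil => simp at hx
  | cons a K ih =>
    rcases List.nodup_cons.mp hnd with ⟨hna, hndK⟩
    rcases List.mem_cons.mp hx with h | h
    · subst h
      have hKf : K.filter p' = K.filter p := by
        apply List.filter_congr
        intro y hy
        rw [hagree y (fun hyx => hna (hyx ▸ hy))]
      cases hpx : p x <;> cases hp'x : p' x <;>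
        simp [hpx, hp'x, hKf]
    · have hax : a ≠ x := fun h' => hna (h' ▸ h)
      have := ih hndK h
      cases hpa : p a <;>
        simp only [List.filter_cons, hagree a hax, hpa, if_true, if_false, List.length_cons,
          Bool.false_eq_true] <;> omega

-- A's loop, one step at a time
lemma pvA_nodup (D : List Int) (h : D.Nodup) : initial_putdown D = D := by
  cases D with
  | nil => rw [initial_putdown]
  | cons d rest =>
    rw [initial_putdown, dif_pos ((pvSetLenIff _).mpr h)]

lemma pvA_pair (x : Int) (D1 : List Int) (hnd : ¬ (x :: D1).Nodup) (hx : x ∈ D1) :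
    initial_putdown (x :: D1) = initial_putdown (D1.erase x) := by
  rw [initial_putdown, dif_neg (fun h => hnd ((pvSetLenIff _).mp h)),
    dif_pos (by simpa using hx), PySem.List.remove?_eq_some_erase (h := hx)]
  rfl

lemma pvA_rot (x : Int) (D1 : List Int) (hnd : ¬ (x :: D1).Nodup) (hx : x ∉ D1) :
    initial_putdown (x :: D1) = initial_putdown (D1 ++ [x]) := by
  rw [initial_putdown, dif_neg (fun h => hnd ((pvSetLenIff _).mp h)),
    dif_neg (by simpa using hx)]

-- the simulation: B's lazy-deletion loop follows A's deck, pending stripped of the lazy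
-- removals IS A's deck, and the fuel bound is maintained
lemma pvSim (K : List Int) (hK : K.Nodup) : ∀ (fuel : Nat) (count skip : PySem.Dict Int Int)
    (dups : Int) (pending : List Int) (c g : Int → Int),
    (∀ y, count.getD y 0 = c y) →
    (∀ y, skip.getD y 0 = g y) →
    (∀ y, 0 ≤ g y) →
    (∀ y ∈ pending, y ∈ K) →
    (∀ y, c y = ((pvStrip pending g).count y : Int)) →
    dups = ((K.filter (fun y => decide (2 ≤ c y))).length : Int) →
    2 * pvPhi (pvStrip pending g) + (K.map (fun y => (g y).toNat)).sum ≤ fuel →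
    pvLoop fuel count dups skip pending = initial_putdown (pvStrip pending g) := by
  intro fuel
  induction fuel with
  | zero =>
    intro count skip dups pending c g hc hs hg hKp hcnt hdups hfuel
    have hphi : pvPhi (pvStrip pending g) = 0 := by omega
    unfold pvPhi at hphi
    have hlen : (pvStrip pending g).length = 0 :=
      mul_self_eq_zero.mp (Nat.eq_zero_of_add_eq_zero_right hphi)
    have hD : pvStrip pending g = [] := List.eq_nil_of_length_eq_zero hlen
    simp only [pvLoop]
    rw [pvCollect_eq_strip pending skip g hs, hD, pvA_nodup [] List.nodup_nil]
  | succ fuel ih =>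
    intro count skip dups pending c g hc hs hg hKp hcnt hdups hfuel
    by_cases hdup : 0 < dups
    · cases pending with
      | nil =>
        exfalso
        have hc0 : ∀ y, c y = 0 := fun y => by rw [hcnt y]; simp [pvStrip]
        have hnil : K.filter (fun y => decide (2 ≤ c y)) = [] := by
          apply List.filter_eq_nil_iff.mpr
          intro y hy
          simp [hc0 y]
        rw [hnil] at hdups
        simp at hdups
        omega
      | cons x rest =>
        simp only [pvLoop, if_pos hdup]
        have hxK : x ∈ K := hKp x List.mem_cons_self
        by_cases hgx : 0 < skip.getD x 0
        · -- a lazily removed card reaches the front: skip it, A's deck is unchanged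
          rw [if_pos hgx]
          have hgx' : 0 < g x := by rwa [hs x] at hgx
          have hstrip : pvStrip (x :: rest) g = pvStrip rest (pvUpd g x (g x - 1)) := by
            rw [pvStrip, if_pos hgx']
          rw [hstrip] at hcnt hfuel ⊢
          have hsum := pvSumUpd K hK x hxK g (pvUpd g x (g x - 1))
            (fun y hy => by simp [pvUpd, hy])
          have hux : pvUpd g x (g x - 1) x = g x - 1 := by simp [pvUpd]
          rw [hux] at hsum
          apply ih _ _ _ _ c (pvUpd g x (g x - 1)) hc
          · intro y
            rw [PySem.Dict.getD_modify]
            by_cases hyx : y = x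
            · subst hyx; simp [pvUpd, hs y]
            · simp [pvUpd, hyx, hs y]
          · intro y
            simp only [pvUpd]
            split
            · omega
            · exact hg y
          · exact fun y hy => hKp y (List.mem_cons_of_mem x hy)
          · exact hcnt
          · exact hdups
          · omega
        · by_cases hcx : 2 ≤ count.getD x 0
          · -- the front card still has a partner: remove the pair
            rw [if_neg hgx, if_pos hcx]
            have hgx0 : g x = 0 := le_antisymm (by rw [← hs x]; omega) (hg x)
            have hD : pvStrip (x :: rest) g = x :: pvStrip rest g := by
              rw [pvStrip, if_neg (by omega)]
            have hcx' : 2 ≤ c x := by rwa [hc x] at hcx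
            have hcountx : (2 : Int) ≤ ((x :: pvStrip rest g).count x : Int) := by
              rw [← hD, ← hcnt]; exact hcx'
            have hcount1 : (x :: pvStrip rest g).count x = (pvStrip rest g).count x + 1 :=
              List.count_cons_self
            have hxD1 : x ∈ pvStrip rest g := by
              apply List.count_pos_iff.mp
              omega
            have hnd : ¬ (x :: pvStrip rest g).Nodup := by
              intro hnd'
              have := List.nodup_iff_count_le_one.mp hnd' x
              omega
            rw [hD, pvA_pair x _ hnd hxD1]
            have hstrip' : pvStrip rest (pvUpd g x (g x + 1)) = (pvStrip rest g).erase x :=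
              pvStrip_bump rest g hg x
            rw [← hstrip']
            have hsum := pvSumUpd K hK x hxK g (pvUpd g x (g x + 1))
              (fun y hy => by simp [pvUpd, hy])
            have hux : pvUpd g x (g x + 1) x = g x + 1 := by simp [pvUpd]
            rw [hux] at hsum
            have hflt := pvFilterUpd K hK x hxK (fun y => decide (2 ≤ c y))
              (fun y => decide (2 ≤ pvUpd c x (c x - 2) y))
              (fun y hy => by simp [pvUpd, hy])
            apply ih _ _ _ _ (pvUpd c x (c x - 2)) (pvUpd g x (g x + 1))
            · intro y
              rw [PySem.Dict.getD_modify]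
              by_cases hyx : y = x
              · subst hyx; simp [pvUpd, hc y]
              · simp [pvUpd, hyx, hc y]
            · intro y
              rw [PySem.Dict.getD_modify]
              by_cases hyx : y = x
              · subst hyx; simp [pvUpd, hs y]
              · simp [pvUpd, hyx, hs y]
            · intro y
              simp only [pvUpd]
              split
              · omega
              · exact hg y
            · exact fun y hy => hKp y (List.mem_cons_of_mem x hy)
            · -- counts of the new deck D1.erase x
              intro y
              rw [hstrip']
              by_cases hyx : y = x
              · subst hyx
                have herase : ((pvStrip rest g).erase y).count y = (pvStrip rest g).count y - 1 :=
                  List.count_erase_self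
                have hcy : c y = ((pvStrip rest g).count y : Int) + 1 := by
                  rw [hcnt y, hD, hcount1]; push_cast; ring
                simp only [pvUpd, if_pos]
                rw [herase]
                have hpos : 1 ≤ (pvStrip rest g).count y := List.count_pos_iff.mpr hxD1
                omega
              · have hcy : c y = ((pvStrip rest g).count y : Int) := by
                  rw [hcnt y, hD]
                  congr 1
                  simp [Ne.symm hyx]
                simp only [pvUpd, if_neg hyx]
                rw [List.count_erase_of_ne hyx, hcy]
                
            · -- the dups counter
              have hgd : (count.modify x 0 (· - 2)).getD x 0 = c x - 2 := by
                rw [PySem.Dict.getD_modify, if_pos rfl, hc x]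
              rw [hgd]
              have hpx : (fun y => decide (2 ≤ c y)) x = true := by simpa using hcx'
              by_cases hlow : c x - 2 < 2
              · rw [if_pos hlow]
                have hp'x : (fun y => decide (2 ≤ pvUpd c x (c x - 2) y)) x = false := by
                  simp [pvUpd]; omega
                have harith : (K.filter (fun y => decide (2 ≤ pvUpd c x (c x - 2) y))).length + 1
                    = (K.filter (fun y => decide (2 ≤ c y))).length := by
                  rw [hpx, hp'x] at hflt
                  simpa using hflt
                rw [hdups]
                push_cast [← harith]
                ring
              · rw [if_neg hlow]
                have hp'x : (fun y => decide (2 ≤ pvUpd c x (c x - 2) y)) x = true := by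
                  simp [pvUpd]; omega
                have harith : (K.filter (fun y => decide (2 ≤ pvUpd c x (c x - 2) y))).length
                    = (K.filter (fun y => decide (2 ≤ c y))).length := by
                  rw [hpx, hp'x] at hflt
                  simpa using hflt
                rw [hdups, harith]
            · -- fuel
              rw [hstrip']
              have hlt : pvPhi ((pvStrip rest g).erase x) < pvPhi (x :: pvStrip rest g) :=
                pvPhi_erase_lt x _ hxD1
              rw [hD] at hfuel
              omega
          · -- the front card is now unique: rotate it to the back
            rw [if_neg hgx, if_neg hcx]
            have hgx0 : g x = 0 := le_antisymm (by rw [← hs x]; omega) (hg x)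
            have hD : pvStrip (x :: rest) g = x :: pvStrip rest g := by
              rw [pvStrip, if_neg (by omega)]
            have hcx' : c x < 2 := by rw [← hc x]; omega
            have hcnt1 : ((x :: pvStrip rest g).count x : Int) = c x := by rw [← hD, ← hcnt]
            have hcount1 : (x :: pvStrip rest g).count x = (pvStrip rest g).count x + 1 :=
              List.count_cons_self
            have hxD1 : x ∉ pvStrip rest g := by
              intro hmem
              have := List.count_pos_iff.mpr hmem
              omega
            have hnd : ¬ (x :: pvStrip rest g).Nodup := by
              have hpos : 0 < (K.filter (fun y => decide (2 ≤ c y))).length := by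
                rw [hdups] at hdup
                exact_mod_cast hdup
              obtain ⟨y, hy⟩ := List.exists_mem_of_length_pos hpos
              have hmem := List.mem_filter.mp hy
              have hcy : 2 ≤ c y := by simpa using hmem.2
              intro hnd'
              have hle := List.nodup_iff_count_le_one.mp hnd' y
              have hcy' := hcnt y
              rw [hD] at hcy'
              omega
            rw [hD, pvA_rot x _ hnd hxD1]
            have hrem : pvStripRem rest g x ≤ 0 := hgx0 ▸ pvStripRem_le rest g x
            have hstrip2 : pvStrip (rest ++ [x]) g = pvStrip rest g ++ [x] := by
              rw [pvStrip_append, pvStrip, if_neg (by omega)]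
              rfl
            rw [← hstrip2]
            apply ih _ _ _ _ c g hc hs hg
            · intro y hy
              rcases List.mem_append.mp hy with h | h
              · exact hKp y (List.mem_cons_of_mem x h)
              · have hyx : y = x := by simpa using h
                exact hyx ▸ hxK
            · intro y
              rw [hstrip2,
                show (pvStrip rest g ++ [x]).count y = (x :: pvStrip rest g).count y from by
                  simp [List.count_append, List.count_cons], ← hD]
              exact hcnt y
            · exact hdups
            · rw [hstrip2]
              have hlt : pvPhi (pvStrip rest g ++ [x]) < pvPhi (x :: pvStrip rest g) :=
                pvPhi_rot_lt x _ hnd hxD1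
              rw [hD] at hfuel
              omega
    · simp only [pvLoop, if_neg hdup]
      rw [pvCollect_eq_strip pending skip g hs]
      have hlen0 : (K.filter (fun y => decide (2 ≤ c y))).length = 0 := by
        rw [hdups] at hdup
        omega
      have hfil : ∀ y ∈ K, ¬ (2 ≤ c y) := by
        intro y hy
        have := List.filter_eq_nil_iff.mp (List.length_eq_zero_iff.mp hlen0) y hy
        simpa using this
      have hnodup : (pvStrip pending g).Nodup := by
        apply List.nodup_iff_count_le_one.mpr
        intro a
        by_cases ha : a ∈ pvStrip pending g
        · have haK : a ∈ K := hKp a (pvStrip_subset pending g a ha)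
          have := hfil a haK
          have hca := hcnt a
          omega
        · rw [List.count_eq_zero_of_not_mem ha]
          omega
      rw [pvA_nodup _ hnodup]

-- stitching it together: the initial state of B's loop satisfies the simulation invariant
lemma pvAltEq (deck : List Int) : initial_putdown_alt deck = initial_putdown deck := by
  have hfold : deck.foldl (fun d x => d.insert x (d.getD x 0 + 1)) PySem.Dict.empty
      = PySem.Dict.counter deck := PySem.Dict.foldl_insert_getD_add_one_eq_counter deck
  have hvalues : (PySem.Dict.counter deck).values
      = (PySem.Set.ofList deck).map (fun k => ((deck.count k : Int))) := by
    have : (PySem.Dict.counter deck).values = (PySem.Dict.counter deck).items.map (·.2) := rfl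
    rw [this, PySem.Dict.items_counter]
    simp
  have hdups : ((((PySem.Dict.counter deck).values).filter (fun c => 2 ≤ c)).length : Int)
      = (((PySem.Set.ofList deck).filter
          (fun y => decide (2 ≤ ((deck.count y : Int))))).length : Int) := by
    rw [hvalues, List.filter_map, List.length_map]
    rfl
  have hstrip0 : pvStrip deck (fun _ => 0) = deck := pvStrip_zero deck _ (fun _ => rfl)
  have hsim := pvSim (PySem.Set.ofList deck) (PySem.Set.nodup_ofList deck)
    (2 * ((deck.length + 1) * (deck.length + 1)))
    (PySem.Dict.counter deck) PySem.Dict.empty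
    ((((PySem.Dict.counter deck).values).filter (fun c => 2 ≤ c)).length : Int)
    deck (fun y => ((deck.count y : Int))) (fun _ => 0)
    (fun y => PySem.Dict.getD_counter deck y)
    (fun y => rfl)
    (fun y => le_refl 0)
    (fun y hy => (PySem.Set.mem_ofList deck y).mpr hy)
    (fun y => by rw [hstrip0])
    (by simpa using hdups)
    (by
      rw [hstrip0]
      have hidx : deck.findIdx (fun y => decide (2 ≤ deck.count y)) ≤ deck.length :=
        List.findIdx_le_length
      have hsum0 : (((PySem.Set.ofList deck).map (fun y => ((0 : Int)).toNat)).sum) = 0 := by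
        simp
      unfold pvPhi
      rw [hsum0]
      nlinarith)
  rw [hstrip0] at hsim
  show pvLoop _ _ _ _ _ = _
  rw [hfold]
  exact hsim

-- ===== VERDICT (by name: the statement is the Claim_ definition above) =====
theorem initial_putdown_spec : Claim_equal_initial_putdown := by
  intro deck _
  unfold Spec_initial_putdown
  rw [pvAltEq]
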